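-- pv_equiv track=rewrite | github.com/Deck-J/Bethel_Presbyterian_Bethel_Park_History | ocr_script.py | strip_refusal_meta
-- ===== SOURCE A (Python) =====
-- from typing import Dict, Any, List, Optional, Tuple, Set
--
-- REFUSAL_SNIPPETS = [
--     "i'm unable to transcribe",
--     "i am unable to transcribe",
--     "i cannot transcribe",
--     "i can't transcribe",
--     "i am not able to transcribe",
--     "unable to transcribe the content from the image provided",
--     "unable to transcribe any text from the provided image",
--     "appears to be blank or contains no discernible text",
--     "if you have another image or need further assistance",
--     "as an ai language model",
--     "as a large language model",
--     "i'm unable to comply",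
--     "i'm sorry, i can't assist with that",
--     "i cannot assist with that request",
--     "i can't help with that request",
-- ]
--
-- def strip_refusal_meta(text: str) -> str:
--     """
--     Remove meta-comment / refusal lines from OCR output.
--     """
--     if not isinstance(text, str) or not text:
--         return text
--
--     lines = text.splitlines()
--     kept: List[str] = []
--
--     for line in lines:
--         lower = line.lower().strip()
--         if not lower:
--             kept.append(line)
--             continue
--         if any(snip in lower for snip in REFUSAL_SNIPPETS):
--             continue
--         kept.append(line)
--
--     cleaned: List[str] = []
--     blank_run = 0
--     for line in kept:
--         if line.strip() == "":
--             blank_run += 1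
--             if blank_run <= 2:
--                 cleaned.append(line)
--         else:
--             blank_run = 0
--             cleaned.append(line)
--
--     return "\n".join(cleaned).strip()
-- ===== SOURCE B (Python) =====
-- REFUSAL_SNIPPETS = [
--     "i'm unable to transcribe",
--     "i am unable to transcribe",
--     "i cannot transcribe",
--     "i can't transcribe",
--     "i am not able to transcribe",
--     "unable to transcribe the content from the image provided",
--     "unable to transcribe any text from the provided image",
--     "appears to be blank or contains no discernible text",
--     "if you have another image or need further assistance",
--     "as an ai language model",
--     "as a large language model",
--     "i'm unable to comply",
--     "i'm sorry, i can't assist with that",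
--     "i cannot assist with that request",
--     "i can't help with that request",
-- ]
--
-- def strip_refusal_meta(text: str) -> str:
--     """Single streaming pass: drop refusal lines and collapse blank runs together."""
--     if not isinstance(text, str) or not text:
--         return text
--     cleaned = []
--     blank_run = 0
--     for line in text.splitlines():
--         lower = line.lower().strip()
--         if not lower:
--             blank_run += 1
--             if blank_run <= 2:
--                 cleaned.append(line)
--         elif any(snip in lower for snip in REFUSAL_SNIPPETS):
--             continue
--         else:
--             blank_run = 0
--             cleaned.append(line)
--     return "\n".join(cleaned).strip()
-- ===== Notes on version B (the rewrite author's own statement) =====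
-- stated objective: simpler
-- what changed: A's two sequential passes (filter refusal lines into an intermediate kept list, then collapse blank runs over it) are fused into one streaming loop with a blank_run counter; refusal lines are skipped without touching the counter, so no intermediate list is built.
import Mathlib
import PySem

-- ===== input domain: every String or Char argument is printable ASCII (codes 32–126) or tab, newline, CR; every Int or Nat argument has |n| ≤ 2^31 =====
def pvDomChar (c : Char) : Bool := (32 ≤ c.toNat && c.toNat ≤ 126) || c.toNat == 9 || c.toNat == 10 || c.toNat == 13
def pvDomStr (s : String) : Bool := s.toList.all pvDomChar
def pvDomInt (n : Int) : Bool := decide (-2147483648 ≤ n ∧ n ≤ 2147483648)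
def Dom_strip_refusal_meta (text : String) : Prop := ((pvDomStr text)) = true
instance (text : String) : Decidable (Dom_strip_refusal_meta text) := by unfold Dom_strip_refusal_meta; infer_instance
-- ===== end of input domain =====

-- B fuses A's two list passes (refusal filtering, then blank-run collapsing) into one
-- streaming loop with a blank_run counter; objective: simpler (one pass, one accumulator).

def pvSnippets : List String := [
  "i'm unable to transcribe",
  "i am unable to transcribe",
  "i cannot transcribe",
  "i can't transcribe",
  "i am not able to transcribe",
  "unable to transcribe the content from the image provided",
  "unable to transcribe any text from the provided image",
  "appears to be blank or contains no discernible text",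
  "if you have another image or need further assistance",
  "as an ai language model",
  "as a large language model",
  "i'm unable to comply",
  "i'm sorry, i can't assist with that",
  "i cannot assist with that request",
  "i can't help with that request"]

-- ===== PORT A =====
-- pass 1: keep blank lines, drop lines containing a refusal snippet
def pvKeepStep (kept : List String) (line : String) : List String :=
  let lower := PySem.Str.strip (PySem.Str.lower line)
  if lower = "" then kept ++ [line]
  else if pvSnippets.any (fun snip => PySem.Str.isIn snip lower) then kept
  else kept ++ [line]

-- pass 2: collapse runs of blank lines, keeping at most two
def pvCollapseStep (st : List String × Int) (line : String) : List String × Int :=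
  if PySem.Str.strip line = "" then
    let blank_run := st.2 + 1
    if blank_run ≤ 2 then (st.1 ++ [line], blank_run) else (st.1, blank_run)
  else (st.1 ++ [line], (0 : Int))

def strip_refusal_meta (text : String) : String :=
  if text = "" then text
  else
    let lines := PySem.Str.splitlines text
    let kept := lines.foldl pvKeepStep []
    let st := kept.foldl pvCollapseStep ([], 0)
    PySem.Str.strip (PySem.Str.join "\n" st.1)

-- ===== PORT B =====
-- single streaming step: blank handling, refusal skip, or keep-and-reset
def pvFuseStep (st : List String × Int) (line : String) : List String × Int :=
  let lower := PySem.Str.strip (PySem.Str.lower line)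
  if lower = "" then
    let blank_run := st.2 + 1
    if blank_run ≤ 2 then (st.1 ++ [line], blank_run) else (st.1, blank_run)
  else if pvSnippets.any (fun snip => PySem.Str.isIn snip lower) then st
  else (st.1 ++ [line], (0 : Int))

def strip_refusal_meta_alt (text : String) : String :=
  if text = "" then text
  else
    let st := (PySem.Str.splitlines text).foldl pvFuseStep ([], 0)
    PySem.Str.strip (PySem.Str.join "\n" st.1)

-- ===== PRECONDITION & SPEC =====
def Spec_strip_refusal_meta (text : String) (out : String) : Prop := out = strip_refusal_meta_alt text
instance (text : String) (out : String) : Decidable (Spec_strip_refusal_meta text out) := by unfold Spec_strip_refusal_meta; infer_instance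

-- ===== CLAIM (what is proved, stated in full; the proofs are below) =====
def Claim_equal_strip_refusal_meta : Prop := ∀ (text : String), Dom_strip_refusal_meta text → Spec_strip_refusal_meta text (strip_refusal_meta text)

-- ===== LEMMAS AND PROOFS =====

theorem pvIsspaceLowerChar (c : Char) :
    PySem.Chars.isspace (PySem.Chars.lowerChar c) = PySem.Chars.isspace c := by
  unfold PySem.Chars.lowerChar
  by_cases h : PySem.Chars.isupper c = true
  · simp only [h, if_pos]
    have hA : 'A' ≤ c ∧ c ≤ 'Z' := by
      simpa [PySem.Chars.isupper] using h
    have hn : 65 ≤ c.toNat ∧ c.toNat ≤ 90 := by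
      obtain ⟨h1, h2⟩ := hA
      exact ⟨h1, h2⟩
    have hv : (c.toNat + 32).isValidChar := by
      left; omega
    have ht : (Char.ofNat (c.toNat + 32)).toNat = c.toNat + 32 := by
      unfold Char.ofNat
      rw [dif_pos hv]
      simp only [Char.ofNatAux, Char.toNat, UInt32.toNat, BitVec.toNat_ofNatLT]
    obtain ⟨h1, h2⟩ := hn
    have hL : PySem.Chars.isspace (Char.ofNat (c.toNat + 32)) = false := by
      simp only [PySem.Chars.isspace, ht]
      simp only [Bool.or_eq_false_iff, Bool.and_eq_false_iff, decide_eq_false_iff_not]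
      omega
    have hR : PySem.Chars.isspace c = false := by
      simp only [PySem.Chars.isspace]
      simp only [Bool.or_eq_false_iff, Bool.and_eq_false_iff, decide_eq_false_iff_not]
      omega
    rw [hL, hR]
  · rw [if_neg h]

theorem pvStripNilIff (l : List Char) :
    PySem.Chars.strip l = [] ↔ ∀ c ∈ l, PySem.Chars.isspace c = true := by
  unfold PySem.Chars.strip PySem.Chars.rstrip PySem.Chars.lstrip
  constructor
  · intro h c hc
    have h1 : ∀ x ∈ (List.dropWhile PySem.Chars.isspace l).reverse,
        PySem.Chars.isspace x = true := by
      rw [List.reverse_eq_nil_iff] at h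
      exact List.dropWhile_eq_nil_iff.mp h
    have h2 : ∀ x ∈ List.dropWhile PySem.Chars.isspace l,
        PySem.Chars.isspace x = true := fun x hx => h1 x (List.mem_reverse.mpr hx)
    have := List.takeWhile_append_dropWhile (p := PySem.Chars.isspace) (l := l)
    rw [← this] at hc
    rcases List.mem_append.mp hc with hx | hx
    · exact List.mem_takeWhile_imp hx
    · exact h2 c hx
  · intro h
    have : List.dropWhile PySem.Chars.isspace l = [] := List.dropWhile_eq_nil_iff.mpr h
    simp [this]

theorem pvStripLowerIff (s : String) :
    PySem.Str.strip (PySem.Str.lower s) = "" ↔ PySem.Str.strip s = "" := by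
  have key : ∀ t : String, (PySem.Str.strip t = "") ↔
      (∀ c ∈ t.toList, PySem.Chars.isspace c = true) := by
    intro t
    rw [← pvStripNilIff]
    constructor
    · intro h
      unfold PySem.Str.strip at h
      have := congrArg String.toList h
      simpa using this
    · intro h
      unfold PySem.Str.strip
      rw [h, String.ofList_nil]
  rw [key, key]
  have hl : (PySem.Str.lower s).toList = PySem.Chars.lower s.toList := by
    simp [PySem.Str.toList_lower]
  rw [hl]
  unfold PySem.Chars.lower
  constructor
  · intro h c hc
    have := h (PySem.Chars.lowerChar c) (List.mem_map_of_mem hc)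
    rwa [pvIsspaceLowerChar] at this
  · intro h c hc
    obtain ⟨d, hd, rfl⟩ := List.mem_map.mp hc
    rw [pvIsspaceLowerChar]
    exact h d hd

theorem pvFuse (lines : List String) :
    ∀ (kept : List String) (st : List String × Int),
    (lines.foldl pvKeepStep kept).foldl pvCollapseStep st =
      lines.foldl pvFuseStep (kept.foldl pvCollapseStep st) := by
  induction lines with
  | nil => intro kept st; simp only [List.foldl_nil]
  | cons l ls ih =>
    intro kept st
    simp only [List.foldl_cons]
    rw [ih]
    have hstep : (pvKeepStep kept l).foldl pvCollapseStep st =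
        pvFuseStep (kept.foldl pvCollapseStep st) l := by
      set K := kept.foldl pvCollapseStep st with hK
      unfold pvKeepStep pvFuseStep
      by_cases hb : PySem.Str.strip (PySem.Str.lower l) = ""
      · have hs : PySem.Str.strip l = "" := (pvStripLowerIff l).mp hb
        rw [if_pos hb, if_pos hb, List.foldl_append, List.foldl_cons, List.foldl_nil, ← hK]
        simp only [pvCollapseStep]
        rw [if_pos hs]
      · have hs : ¬ PySem.Str.strip l = "" := fun h => hb ((pvStripLowerIff l).mpr h)
        by_cases ha : pvSnippets.any (fun snip => PySem.Str.isIn snip (PySem.Str.strip (PySem.Str.lower l))) = true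
        · rw [if_neg hb, if_neg hb, if_pos ha, if_pos ha, ← hK]
        · rw [if_neg hb, if_neg hb, if_neg ha, if_neg ha, List.foldl_append,
            List.foldl_cons, List.foldl_nil, ← hK]
          simp only [pvCollapseStep]
          rw [if_neg hs]
    rw [hstep]

-- ===== VERDICT (by name: the statement is the Claim_ definition above) =====
theorem strip_refusal_meta_spec : Claim_equal_strip_refusal_meta := by
  intro text _
  unfold Spec_strip_refusal_meta strip_refusal_meta strip_refusal_meta_alt
  by_cases h : text = ""
  · simp [h]
  · simp only [if_neg h]
    show PySem.Str.strip (PySem.Str.join "\n"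
        ((List.foldl pvKeepStep [] (PySem.Str.splitlines text)).foldl pvCollapseStep ([], 0)).1) =
      PySem.Str.strip (PySem.Str.join "\n"
        ((PySem.Str.splitlines text).foldl pvFuseStep ([], 0)).1)
    rw [pvFuse]
    simp only [List.foldl_nil]
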